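-- pv_equiv track=rewrite | github.com/advillalba/curso-python | unit3/review/Exercice1.py | eliminar_articulo
-- ===== SOURCE A (Python) =====
-- def __split_products__(cadena: str) -> []:
--     """ Separa los productos almacenados en la cadena """
--     n = 20
--     products = [cadena[i:i + n] for i in range(0, len(cadena), n)]
--     return products
--
-- def eliminar_articulo(cadena: str, codigo: int) -> str:
--     """ Elimina un artículo de la cadena y retorna la nueva cadena. """
--     _products = __split_products__(cadena)
--     _deleted = False
--     i = 0
--
--     while not _deleted and i < len(_products):
--         if int(_products[i][:4]) == codigo:
--             del _products[i]
--             _deleted = True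
--         i += 1
--
--     return ''.join(_products)
-- ===== SOURCE B (Python) =====
-- def eliminar_articulo(cadena: str, codigo: int) -> str:
--     """Scan the string directly in 20-char steps; splice out the first matching record."""
--     for i in range(0, len(cadena), 20):
--         if int(cadena[i:i+4]) == codigo:
--             return cadena[:i] + cadena[i+20:]
--     return cadena
-- ===== Notes on version B (the rewrite author's own statement) =====
-- stated objective: simpler
-- what changed: B drops the intermediate list of 20-char records, the while/del loop and the final ''.join: it scans record starts directly with range(0, len, 20) and returns cadena[:i] + cadena[i+20:] at the first code match, else cadena unchanged.
import Mathlib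
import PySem

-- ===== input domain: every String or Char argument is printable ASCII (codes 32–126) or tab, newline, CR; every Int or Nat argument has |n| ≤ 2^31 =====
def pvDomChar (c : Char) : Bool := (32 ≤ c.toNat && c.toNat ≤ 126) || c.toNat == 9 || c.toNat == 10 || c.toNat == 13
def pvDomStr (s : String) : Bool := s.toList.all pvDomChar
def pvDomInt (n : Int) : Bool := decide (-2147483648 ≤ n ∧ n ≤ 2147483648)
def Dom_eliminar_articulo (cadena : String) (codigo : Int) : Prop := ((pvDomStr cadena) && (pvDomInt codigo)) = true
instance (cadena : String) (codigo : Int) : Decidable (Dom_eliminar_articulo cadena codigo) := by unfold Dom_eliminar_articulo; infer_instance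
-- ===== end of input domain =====

-- B replaces A's split-into-a-list-of-records + while/del + ''.join by a direct index scan of the
-- string with one splice 'cadena[:i] + cadena[i+20:]' at the first matching record (objective: simpler).

-- ===== PORT A =====
-- __split_products__: [cadena[i:i+20] for i in range(0, len(cadena), 20)]
def pvSplitProducts (cs : List Char) : List (List Char) :=
  (PySem.List.pyRange 0 (cs.length : Int) 20).map
    (fun i => PySem.List.slice cs (some i) (some (i + 20)))

-- the while-loop: scan the products, delete the first one whose int(p[:4]) equals codigo, then stop
def pvWhileDel (codigo : Int) : List (List Char) → List (List Char)
  | [] => []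
  | p :: rest =>
    if (PySem.Int.ofChars? (PySem.List.slice p none (some 4))).getD 0 = codigo then rest
    else p :: pvWhileDel codigo rest

def eliminar_articulo (cadena : String) (codigo : Int) : String :=
  String.ofList (PySem.Chars.join [] (pvWhileDel codigo (pvSplitProducts cadena.toList)))

-- ===== PORT B =====
-- for i in range(0, len(cadena), 20): if int(cadena[i:i+4]) == codigo: return cadena[:i] + cadena[i+20:]
def pvScan (cs : List Char) (codigo : Int) : List Int → List Char
  | [] => cs
  | i :: rest =>
    if (PySem.Int.ofChars? (PySem.List.slice cs (some i) (some (i + 4)))).getD 0 = codigo then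
      PySem.List.slice cs none (some i) ++ PySem.List.slice cs (some (i + 20)) none
    else pvScan cs codigo rest

def eliminar_articulo_alt (cadena : String) (codigo : Int) : String :=
  String.ofList (pvScan cadena.toList codigo (PySem.List.pyRange 0 (cadena.toList.length : Int) 20))

-- ===== PRECONDITION & SPEC =====
-- helpers for Pre_ only (not used by the ports)
def pvChunkParse (cs : List Char) (k : Nat) : Option Int :=
  PySem.Int.ofChars? (PySem.List.slice cs (some ((20 * k : Nat) : Int)) (some ((20 * k + 4 : Nat) : Int)))

def pvChunkOk (cs : List Char) (codigo : Int) (k : Nat) : Bool :=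
  match pvChunkParse cs k with
  | some v => v != codigo
  | none => false

-- Pre_ excludes exactly the inputs on which Python A raises ValueError: some record reached by the
-- scan (every earlier record parsed and did not match) has a first-4-character field int() rejects.
def Pre_eliminar_articulo (cadena : String) (codigo : Int) : Prop :=
  ∀ k < (cadena.toList.length + 19) / 20,
    (∀ l < k, pvChunkOk cadena.toList codigo l = true) →
    (pvChunkParse cadena.toList k).isSome = true
instance (cadena : String) (codigo : Int) : Decidable (Pre_eliminar_articulo cadena codigo) := by
  unfold Pre_eliminar_articulo; infer_instance

def pvWitness_eliminar_articulo : String × Int := ("0001aaaaaaaaaaaaaaaa0002bbbbbbbbbbbbbbbb", 2)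

def Spec_eliminar_articulo (cadena : String) (codigo : Int) (out : String) : Prop := out = eliminar_articulo_alt cadena codigo
instance (cadena : String) (codigo : Int) (out : String) : Decidable (Spec_eliminar_articulo cadena codigo out) := by unfold Spec_eliminar_articulo; infer_instance

-- ===== CLAIM (what is proved, stated in full; the proofs are below) =====
def Claim_equal_eliminar_articulo : Prop := ∀ (cadena : String) (codigo : Int), Dom_eliminar_articulo cadena codigo → Pre_eliminar_articulo cadena codigo → Spec_eliminar_articulo cadena codigo (eliminar_articulo cadena codigo)

-- ===== LEMMAS AND PROOFS =====

lemma pyRange20_nil (a b : Int) (h : b ≤ a) : PySem.List.pyRange a b 20 = [] := by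
  rw [PySem.List.pyRange_of_pos a b (by norm_num)]
  simp [show ¬ a < b by omega]

lemma pyRange20_cons (a b : Int) (h : a < b) :
    PySem.List.pyRange a b 20 = a :: PySem.List.pyRange (a + 20) b 20 := by
  rw [PySem.List.pyRange_of_pos a b (by norm_num),
    PySem.List.pyRange_of_pos (a + 20) b (by norm_num)]
  have h1 : (if a < b then ((b - a + 20 - 1) / 20).toNat else 0)
      = (if a + 20 < b then ((b - (a + 20) + 20 - 1) / 20).toNat else 0) + 1 := by
    by_cases h2 : a + 20 < b
    · simp only [if_pos h, if_pos h2]; omega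
    · simp only [if_pos h, if_neg h2]; omega
  rw [h1, List.range_succ_eq_map]
  simp only [List.map_cons, List.map_map]
  refine congrArg₂ _ (by norm_num) (List.map_congr_left fun k _ => ?_)
  simp only [Function.comp_apply]
  push_cast; ring

lemma pvJoin_cons (p : List Char) (ps : List (List Char)) :
    PySem.Chars.join [] (p :: ps) = p ++ PySem.Chars.join [] ps := by
  cases ps with
  | nil => simp [PySem.Chars.join, List.intercalate]
  | cons q qs => rw [PySem.Chars.join_cons_cons]; simp

-- joining the 20-char chunks starting at position a rebuilds the suffix cs.drop a
lemma pvJoinChunks (cs : List Char) (a : Nat) :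
    PySem.Chars.join []
      ((PySem.List.pyRange (a : Int) (cs.length : Int) 20).map
        (fun i => PySem.List.slice cs (some i) (some (i + 20)))) = cs.drop a := by
  by_cases h : a < cs.length
  · rw [pyRange20_cons _ _ (by exact_mod_cast h)]
    rw [List.map_cons, pvJoin_cons]
    have hc : ((a : Int) + 20) = ((a + 20 : Nat) : Int) := by push_cast; ring
    rw [hc, pvJoinChunks cs (a + 20), PySem.List.slice_natCast,
      show a + 20 - a = 20 by omega,
      show List.drop (a + 20) cs = (cs.drop a).drop 20 by rw [List.drop_drop]]
    exact List.take_append_drop 20 (cs.drop a)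
  · rw [pyRange20_nil _ _ (by exact_mod_cast Nat.le_of_not_lt h)]
    simp [PySem.Chars.join_nil, List.drop_eq_nil_of_le (Nat.le_of_not_lt h)]
termination_by cs.length - a
decreasing_by omega

-- the two scans agree, up to the prefix cs.take a that B keeps implicitly
lemma pvMain (cs : List Char) (codigo : Int) (a : Nat) :
    pvScan cs codigo (PySem.List.pyRange (a : Int) (cs.length : Int) 20)
      = cs.take a ++ PySem.Chars.join []
          (pvWhileDel codigo
            ((PySem.List.pyRange (a : Int) (cs.length : Int) 20).map
              (fun i => PySem.List.slice cs (some i) (some (i + 20))))) := by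
  by_cases h : a < cs.length
  · rw [pyRange20_cons _ _ (by exact_mod_cast h)]
    have hc : ((a : Int) + 20) = ((a + 20 : Nat) : Int) := by push_cast; ring
    have hc4 : ((a : Int) + 4) = ((a + 4 : Nat) : Int) := by push_cast; ring
    have hfield : PySem.List.slice (PySem.List.slice cs (some (a : Int)) (some ((a : Int) + 20))) none (some 4)
        = PySem.List.slice cs (some (a : Int)) (some ((a : Int) + 4)) := by
      rw [hc, hc4, PySem.List.slice_natCast, PySem.List.slice_natCast,
        show a + 20 - a = 20 by omega, show a + 4 - a = 4 by omega,
        PySem.List.slice_to ((cs.drop a).take 20) (by norm_num : (0:Int) ≤ (4:Int))]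
      simp [List.take_take]
    rw [List.map_cons]
    simp only [pvScan, pvWhileDel, hfield]
    by_cases hm : (PySem.Int.ofChars? (PySem.List.slice cs (some (a : Int)) (some ((a : Int) + 4)))).getD 0 = codigo
    · rw [if_pos hm, if_pos hm]
      rw [hc, pvJoinChunks cs (a + 20),
        PySem.List.slice_to_natCast, PySem.List.slice_from_natCast]
    · rw [if_neg hm, if_neg hm]
      rw [hc, pvMain cs codigo (a + 20), pvJoin_cons, PySem.List.slice_natCast,
        show a + 20 - a = 20 by omega, List.take_add, List.append_assoc]
  · rw [pyRange20_nil _ _ (by exact_mod_cast Nat.le_of_not_lt h)]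
    simp [pvScan, pvWhileDel, PySem.Chars.join_nil,
      List.take_of_length_le (Nat.le_of_not_lt h)]
termination_by cs.length - a
decreasing_by omega

-- ===== VERDICT (by name: the statement is the Claim_ definition above) =====
theorem eliminar_articulo_spec : Claim_equal_eliminar_articulo := by
  intro cadena codigo _ _
  unfold Spec_eliminar_articulo eliminar_articulo eliminar_articulo_alt pvSplitProducts
  have := pvMain cadena.toList codigo 0
  simp only [Nat.cast_zero, List.take_zero, List.nil_append] at this
  rw [this]
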